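-- pv_equiv track=rewrite | github.com/sasukepn1999/Logic-Clauses | Source code/Part 3/BackwardChaining.py | ExpressionLogic
-- ===== SOURCE A (Python) =====
-- def isLowerCase(char):
-- 	return ('a' <= char and char <= 'z')
--
-- def isUpperCase(char):
-- 	return ('A' <= char and char <= 'Z')
--
-- def inAlphabet(char):
-- 	return isLowerCase(char) or isUpperCase(char)
--
-- def ExpressionLogic(string):
-- 	exp = ""
-- 	for i in range(len(string)):
-- 		if not inAlphabet(string[i]):
-- 			exp = exp + string[i]
-- 		elif len(exp) > 0:
-- 			break;
--
-- 	result = [exp]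
-- 	result.extend(string.split(exp))
--
-- 	return result
-- ===== SOURCE B (Python) =====
-- def ExpressionLogic(string):
--     n = len(string)
--     i = 0
--     while i < n and ('a' <= string[i] <= 'z' or 'A' <= string[i] <= 'Z'):
--         i += 1
--     j = i
--     while j < n and not ('a' <= string[j] <= 'z' or 'A' <= string[j] <= 'Z'):
--         j += 1
--     exp = string[i:j]
--     return [exp] + string.split(exp)
-- ===== Notes on version B (the rewrite author's own statement) =====
-- stated objective: simpler
-- what changed: Replaces A's one-pass accumulator state machine (build exp char by char, break once a letter follows a nonempty exp) by two index scans -- advance past leading letters, then past the non-letter run -- and a single slice string[i:j] for exp; no per-character string concatenation and no break/flag logic.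
import Mathlib
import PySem

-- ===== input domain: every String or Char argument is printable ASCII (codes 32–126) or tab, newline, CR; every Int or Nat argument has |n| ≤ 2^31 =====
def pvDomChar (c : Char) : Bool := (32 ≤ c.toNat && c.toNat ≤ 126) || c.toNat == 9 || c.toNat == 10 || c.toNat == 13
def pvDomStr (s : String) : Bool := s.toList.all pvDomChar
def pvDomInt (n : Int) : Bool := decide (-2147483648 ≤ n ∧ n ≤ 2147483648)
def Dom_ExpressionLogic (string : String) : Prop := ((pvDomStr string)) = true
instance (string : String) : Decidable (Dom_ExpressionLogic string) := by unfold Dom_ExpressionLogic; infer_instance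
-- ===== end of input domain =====

-- B extracts the first non-letter run by two index scans and one slice instead of A's
-- accumulator-with-break state machine (objective: simpler; same split call afterwards).

-- ===== PORT A =====
def pvIsLowerCase (c : Char) : Bool := 'a' ≤ c && c ≤ 'z'
def pvIsUpperCase (c : Char) : Bool := 'A' ≤ c && c ≤ 'Z'
def pvInAlphabet (c : Char) : Bool := pvIsLowerCase c || pvIsUpperCase c

-- A's for-loop over the characters with the accumulated exp and the 'break' as early return
def pvLoopA : List Char → List Char → List Char
  | [], exp => exp
  | c :: rest, exp =>
    if !(pvInAlphabet c) then pvLoopA rest (exp ++ [c])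
    else if exp.length > 0 then exp
    else pvLoopA rest exp

def ExpressionLogic (string : String) : List String :=
  let exp := String.ofList (pvLoopA string.toList [])
  -- string.split(exp): Python raises ValueError when exp = "" (none branch, excluded by Pre_)
  match PySem.Str.split? string exp with
  | some parts => exp :: parts
  | none => [exp]

-- ===== PORT B =====
-- first while loop of Source B: advance i past the leading letters (tail from index i)
def pvSkipLetters : List Char → List Char
  | [] => []
  | c :: rest =>
    if ('a' ≤ c && c ≤ 'z') || ('A' ≤ c && c ≤ 'Z') then pvSkipLetters rest else c :: rest

-- second while loop of Source B: advance j over the non-letter run; string[i:j] is this prefix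
def pvTakeRun : List Char → List Char
  | [] => []
  | c :: rest =>
    if ('a' ≤ c && c ≤ 'z') || ('A' ≤ c && c ≤ 'Z') then [] else c :: pvTakeRun rest

def ExpressionLogic_alt (string : String) : List String :=
  let exp := String.ofList (pvTakeRun (pvSkipLetters string.toList))
  match PySem.Str.split? string exp with
  | some parts => exp :: parts
  | none => [exp]

-- ===== PRECONDITION & SPEC =====
-- Pre_ excludes exactly the strings with no non-letter character (letters-only or empty):
-- there the delimiter run is empty and Python's split with an empty separator raises
-- ValueError in both A and B.
def Pre_ExpressionLogic (string : String) : Prop :=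
  (string.toList.any (fun c => !(('a' ≤ c && c ≤ 'z') || ('A' ≤ c && c ≤ 'Z')))) = true
instance (string : String) : Decidable (Pre_ExpressionLogic string) := by
  unfold Pre_ExpressionLogic; infer_instance

def pvWitness_ExpressionLogic : String := "p->q"

def Spec_ExpressionLogic (string : String) (out : List String) : Prop := out = ExpressionLogic_alt string
instance (string : String) (out : List String) : Decidable (Spec_ExpressionLogic string out) := by
  unfold Spec_ExpressionLogic; infer_instance

-- ===== CLAIM (what is proved, stated in full; the proofs are below) =====
def Claim_equal_ExpressionLogic : Prop := ∀ (string : String), Dom_ExpressionLogic string → Pre_ExpressionLogic string → Spec_ExpressionLogic string (ExpressionLogic string)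

-- ===== LEMMAS AND PROOFS =====

-- once exp is nonempty, A's loop just appends the rest of the current non-letter run
lemma pvLoopA_ne_nil (cs : List Char) : ∀ exp : List Char, exp ≠ [] →
    pvLoopA cs exp = exp ++ pvTakeRun cs := by
  induction cs with
  | nil => intro exp _; simp [pvLoopA, pvTakeRun]
  | cons c rest ih =>
    intro exp hne
    have hl : exp.length > 0 := List.length_pos_iff.mpr hne
    cases hb : (('a' ≤ c && c ≤ 'z') || ('A' ≤ c && c ≤ 'Z')) with
    | true  => simp [pvLoopA, pvTakeRun, pvInAlphabet, pvIsLowerCase, pvIsUpperCase, hb, hl]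
    | false => simp [pvLoopA, pvTakeRun, pvInAlphabet, pvIsLowerCase, pvIsUpperCase, hb,
        ih (exp ++ [c]) (by simp)]

-- A's loop from the empty accumulator computes B's skip-then-take run
lemma pvLoopA_eq (cs : List Char) : pvLoopA cs [] = pvTakeRun (pvSkipLetters cs) := by
  induction cs with
  | nil => rfl
  | cons c rest ih =>
    cases hb : (('a' ≤ c && c ≤ 'z') || ('A' ≤ c && c ≤ 'Z')) with
    | true  => simp [pvLoopA, pvSkipLetters, pvInAlphabet, pvIsLowerCase, pvIsUpperCase, hb, ih]
    | false => simp [pvLoopA, pvSkipLetters, pvTakeRun, pvInAlphabet, pvIsLowerCase,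
        pvIsUpperCase, hb, pvLoopA_ne_nil rest [c] (by simp)]

-- ===== VERDICT (by name: the statement is the Claim_ definition above) =====
theorem ExpressionLogic_spec : Claim_equal_ExpressionLogic := by
  intro s _ _
  unfold Spec_ExpressionLogic ExpressionLogic ExpressionLogic_alt
  rw [pvLoopA_eq]
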